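-- pv_equiv track=rewrite | github.com/mmontalbo/binary_lens | scripts/binary_lens_cli.py | _parse_script_options
-- ===== SOURCE A (Python) =====
-- def _parse_script_options(script_args):
--     profile_enabled = False
--     analysis_profile = None
--     for arg in script_args:
--         if arg.startswith("profile="):
--             value = arg.split("=", 1)[1].strip().lower()
--             profile_enabled = value in ("1", "true", "yes", "on")
--         elif arg.startswith("analysis_profile="):
--             analysis_profile = arg.split("=", 1)[1].strip().lower()
--     return profile_enabled, analysis_profile
-- ===== SOURCE B (Python) =====
-- def _parse_script_options(script_args):
--     opts = {}
--     for arg in script_args: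
--         if "=" in arg:
--             key, value = arg.split("=", 1)
--             opts[key] = value
--     profile_enabled = False
--     analysis_profile = None
--     if "profile" in opts:
--         profile_enabled = opts["profile"].strip().lower() in ("1", "true", "yes", "on")
--     if "analysis_profile" in opts:
--         analysis_profile = opts["analysis_profile"].strip().lower()
--     return profile_enabled, analysis_profile
-- ===== Notes on version B (the rewrite author's own statement) =====
-- stated objective: alternative
-- what changed: B replaces A's two startswith-prefix branches by a populate-then-query shape: one pass builds a key->value dict from every '='-bearing argument (split on the first '=', last occurrence wins), and the two results are read off the dict afterwards.
import Mathlib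
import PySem

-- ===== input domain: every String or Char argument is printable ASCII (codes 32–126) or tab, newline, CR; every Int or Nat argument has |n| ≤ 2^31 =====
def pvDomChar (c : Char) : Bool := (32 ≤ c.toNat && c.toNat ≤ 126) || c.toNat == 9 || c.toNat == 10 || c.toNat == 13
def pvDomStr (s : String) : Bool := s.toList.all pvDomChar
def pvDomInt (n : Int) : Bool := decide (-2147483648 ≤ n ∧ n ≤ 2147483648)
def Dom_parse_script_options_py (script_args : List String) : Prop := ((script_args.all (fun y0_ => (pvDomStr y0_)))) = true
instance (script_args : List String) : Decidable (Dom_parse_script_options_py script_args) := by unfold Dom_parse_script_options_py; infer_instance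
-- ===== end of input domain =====

-- B builds a key→value table from the '='-bearing arguments in one pass and reads the two
-- options off the table afterwards, instead of A's two prefix-test branches; same cost ("alternative").

-- ===== PORT A =====
-- the body of A's for-loop, as a helper; the branches in A's order
def pvStepA (st : Bool × Option String) (arg : String) : Bool × Option String :=
  if PySem.Str.startswith arg "profile=" then
    let value := PySem.Str.lower (PySem.Str.strip
      (PySem.List.pyGetD ((PySem.Str.splitMax? arg "=" 1).getD []) 1 ""))
    (["1", "true", "yes", "on"].contains value, st.2)
  else if PySem.Str.startswith arg "analysis_profile=" then
    (st.1, some (PySem.Str.lower (PySem.Str.strip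
      (PySem.List.pyGetD ((PySem.Str.splitMax? arg "=" 1).getD []) 1 ""))))
  else st

def parse_script_options_py (script_args : List String) : Bool × Option String :=
  script_args.foldl pvStepA (false, none)

-- ===== PORT B =====
-- the body of Source B's for-loop: store value under the key before the first '='
def pvStepB (d : PySem.Dict String String) (arg : String) : PySem.Dict String String :=
  if PySem.Str.isIn "=" arg then
    let parts := (PySem.Str.splitMax? arg "=" 1).getD []
    d.insert (PySem.List.pyGetD parts 0 "") (PySem.List.pyGetD parts 1 "")
  else d

def parse_script_options_py_alt (script_args : List String) : Bool × Option String :=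
  let opts : PySem.Dict String String := script_args.foldl pvStepB PySem.Dict.empty
  let profile_enabled :=
    match opts.get? "profile" with
    | some v => ["1", "true", "yes", "on"].contains (PySem.Str.lower (PySem.Str.strip v))
    | none => false
  let analysis_profile := (opts.get? "analysis_profile").map
    (fun v => PySem.Str.lower (PySem.Str.strip v))
  (profile_enabled, analysis_profile)

-- ===== PRECONDITION & SPEC =====
def Spec_parse_script_options_py (script_args : List String) (out : Bool × Option String) : Prop := out = parse_script_options_py_alt script_args
instance (script_args : List String) (out : Bool × Option String) : Decidable (Spec_parse_script_options_py script_args out) := by unfold Spec_parse_script_options_py; infer_instance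

-- ===== CLAIM (what is proved, stated in full; the proofs are below) =====
def Claim_equal_parse_script_options_py : Prop := ∀ (script_args : List String), Dom_parse_script_options_py script_args → Spec_parse_script_options_py script_args (parse_script_options_py script_args)

-- ===== LEMMAS AND PROOFS =====

-- reading the two options off a dict (the shape B's final section computes)
def pvQuery (d : PySem.Dict String String) : Bool × Option String :=
  (match d.get? "profile" with
   | some v => ["1", "true", "yes", "on"].contains (PySem.Str.lower (PySem.Str.strip v))
   | none => false,
   (d.get? "analysis_profile").map (fun v => PySem.Str.lower (PySem.Str.strip v)))

theorem pv_go_m0 (fuel : ℕ) (l cur : List Char) (acc : List (List Char)) :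
    PySem.Chars.splitOnMax.go ['='] fuel 0 l cur acc = ((cur.reverse ++ l) :: acc).reverse := by
  cases fuel <;> cases l <;> simp [PySem.Chars.splitOnMax.go]

theorem pv_go_found : ∀ (a : List Char) (fuel : ℕ) (b cur : List Char) (acc : List (List Char)),
    '=' ∉ a → a.length < fuel →
    PySem.Chars.splitOnMax.go ['='] fuel 1 (a ++ '=' :: b) cur acc
      = acc.reverse ++ [cur.reverse ++ a, b] := by
  intro a
  induction a with
  | nil =>
    intro fuel b cur acc _ hf
    cases fuel with
    | zero => omega
    | succ f =>
      simp only [List.nil_append, PySem.Chars.splitOnMax.go]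
      rw [if_neg (by omega), if_pos (by simp [List.isPrefixOf])]
      rw [pv_go_m0]
      simp
  | cons c a ih =>
    intro fuel b cur acc hmem hf
    cases fuel with
    | zero => simp at hf
    | succ f =>
      have hc : c ≠ '=' := fun h => hmem (by simp [h])
      have hnp : ¬ (List.isPrefixOf ['='] (c :: (a ++ '=' :: b)) = true) := by
        simp [List.isPrefixOf_cons₂]
        intro h
        exact hc h.symm
      simp only [List.cons_append, PySem.Chars.splitOnMax.go]
      rw [if_neg (by omega), if_neg hnp]
      rw [ih f b (c :: cur) acc (fun h => hmem (List.mem_cons_of_mem _ h)) (by simp at hf ⊢; omega)]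
      simp

theorem pv_split_first (a b : List Char) (h : '=' ∉ a) :
    PySem.Chars.splitOnMax (a ++ '=' :: b) ['='] 1 = [a, b] := by
  unfold PySem.Chars.splitOnMax
  rw [if_neg (by norm_num), show ((1:ℤ).toNat) = 1 from rfl]
  rw [pv_go_found a ((a ++ '=' :: b).length + 1) b [] [] h (by simp)]
  simp

theorem pv_first_unique : ∀ (a₁ a₂ b₁ b₂ : List Char), '=' ∉ a₁ → '=' ∉ a₂ →
    a₁ ++ '=' :: b₁ = a₂ ++ '=' :: b₂ → a₁ = a₂ ∧ b₁ = b₂ := by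
  intro a₁
  induction a₁ with
  | nil =>
    intro a₂ b₁ b₂ _ h₂ heq
    cases a₂ with
    | nil => simpa using heq
    | cons c t =>
      have hc : c = '=' := by
        have := congrArg (fun l => l.headI) heq
        simpa using this.symm
      exact absurd (hc ▸ List.mem_cons_self) h₂
  | cons c a ih =>
    intro a₂ b₁ b₂ h₁ h₂ heq
    cases a₂ with
    | nil =>
      have hc : c = '=' := by
        have := congrArg (fun l => l.headI) heq
        simpa using this
      exact absurd (hc ▸ List.mem_cons_self) h₁
    | cons c' t =>
      simp only [List.cons_append, List.cons.injEq] at heq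
      obtain ⟨hc, hrest⟩ := heq
      obtain ⟨ha, hb⟩ := ih t b₁ b₂ (fun h => h₁ (List.mem_cons_of_mem _ h))
        (fun h => h₂ (List.mem_cons_of_mem _ h)) hrest
      exact ⟨by rw [hc, ha], hb⟩

theorem pv_decomp : ∀ (l : List Char), '=' ∈ l → ∃ a b, l = a ++ '=' :: b ∧ '=' ∉ a := by
  intro l
  induction l with
  | nil => intro h; simp at h
  | cons c t ih =>
    intro h
    by_cases hc : c = '='
    · exact ⟨[], t, by simp [hc], by simp⟩
    · have ht : '=' ∈ t := by
        rcases List.mem_cons.mp h with h' | h'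
        · exact absurd h'.symm hc
        · exact h'
      obtain ⟨a, b, hab, hna⟩ := ih ht
      refine ⟨c :: a, b, by simp [hab], ?_⟩
      intro hm
      rcases List.mem_cons.mp hm with h' | h'
      · exact hc h'.symm
      · exact hna h'

-- convenience: the two parts of splitMax? arg "=" 1 when arg = a ++ '=' :: b with '=' ∉ a
theorem pv_parts (arg : String) (a b : List Char) (hdec : arg.toList = a ++ '=' :: b)
    (hna : '=' ∉ a) :
    (PySem.Str.splitMax? arg "=" 1).getD [] = [String.ofList a, String.ofList b] := by
  simp only [PySem.Str.splitMax?]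
  have : PySem.Chars.splitMax? arg.toList "=".toList 1 = some [a, b] := by
    simp only [PySem.Chars.splitMax?, hdec]
    rw [if_neg (by simp [String.toList]; decide)]
    have : "=".toList = ['='] := by decide
    rw [this, pv_split_first a b hna]
  rw [this]
  simp

-- ===== the per-argument step lemma =====
theorem pv_step (d : PySem.Dict String String) (arg : String) :
    pvStepA (pvQuery d) arg = pvQuery (pvStepB d arg) := by
  by_cases hin : '=' ∈ arg.toList
  · obtain ⟨a, b, hdec, hna⟩ := pv_decomp arg.toList hin
    have hparts := pv_parts arg a b hdec hna
    have hIn : PySem.Str.isIn "=" arg = true := by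
      rw [PySem.Str.isIn, PySem.Chars.isIn_iff_infix]
      exact ⟨a, b, by simpa using hdec.symm⟩
    have hkey : PySem.List.pyGetD ((PySem.Str.splitMax? arg "=" 1).getD []) 0 "" = String.ofList a := by
      rw [hparts]; simp [PySem.List.pyGetD, PySem.List.pyGet?, PySem.List.pyIdx?]
    have hval : PySem.List.pyGetD ((PySem.Str.splitMax? arg "=" 1).getD []) 1 "" = String.ofList b := by
      rw [hparts]; simp [PySem.List.pyGetD, PySem.List.pyGet?, PySem.List.pyIdx?]
    by_cases hp : a = "profile".toList
    · -- key is "profile": A's first branch fires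
      have hsw : PySem.Str.startswith arg "profile=" = true := by
        rw [PySem.Str.startswith, PySem.Chars.startswith, List.isPrefixOf_iff_prefix]
        exact ⟨b, by rw [hdec, hp]; rfl⟩
      have hk : String.ofList a = "profile" := by rw [hp]; rfl
      simp only [pvStepA, pvStepB, hsw, hIn, if_true, hkey, hval, hk]
      unfold pvQuery
      rw [PySem.Dict.get?_insert_self, PySem.Dict.get?_insert_of_ne _ _ (by decide : ("analysis_profile":String) ≠ "profile")]
    · by_cases hap : a = "analysis_profile".toList
      · -- key is "analysis_profile": A's elif fires
        have hsw : PySem.Str.startswith arg "profile=" = false := by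
          rw [PySem.Str.startswith]
          apply Bool.eq_false_iff.mpr
          intro hsw
          rw [PySem.Chars.startswith, List.isPrefixOf_iff_prefix] at hsw
          obtain ⟨r, hr⟩ := hsw
          have : "profile".toList ++ '=' :: r = a ++ '=' :: b := by
            rw [← hdec, ← hr]; rfl
          have := (pv_first_unique _ _ _ _ (by decide) hna this).1
          exact hp this.symm
        have hsw2 : PySem.Str.startswith arg "analysis_profile=" = true := by
          rw [PySem.Str.startswith, PySem.Chars.startswith, List.isPrefixOf_iff_prefix]
          exact ⟨b, by rw [hdec, hap]; rfl⟩
        have hk : String.ofList a = "analysis_profile" := by rw [hap]; rfl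
        simp only [pvStepA, pvStepB, hsw, hsw2, hIn, if_true,
          Bool.false_eq_true, if_false, hkey, hval, hk]
        unfold pvQuery
        rw [PySem.Dict.get?_insert_self, PySem.Dict.get?_insert_of_ne _ _ (by decide : ("profile":String) ≠ "analysis_profile")]
        simp
      · -- some other key: neither branch fires, lookups unchanged
        have hsw : PySem.Str.startswith arg "profile=" = false := by
          rw [PySem.Str.startswith]
          apply Bool.eq_false_iff.mpr
          intro hsw
          rw [PySem.Chars.startswith, List.isPrefixOf_iff_prefix] at hsw
          obtain ⟨r, hr⟩ := hsw
          have : "profile".toList ++ '=' :: r = a ++ '=' :: b := by rw [← hdec, ← hr]; rfl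
          exact hp (pv_first_unique _ _ _ _ (by decide) hna this).1.symm
        have hsw2 : PySem.Str.startswith arg "analysis_profile=" = false := by
          rw [PySem.Str.startswith]
          apply Bool.eq_false_iff.mpr
          intro hsw
          rw [PySem.Chars.startswith, List.isPrefixOf_iff_prefix] at hsw
          obtain ⟨r, hr⟩ := hsw
          have : "analysis_profile".toList ++ '=' :: r = a ++ '=' :: b := by rw [← hdec, ← hr]; rfl
          exact hap (pv_first_unique _ _ _ _ (by decide) hna this).1.symm
        have hk1 : String.ofList a ≠ "profile" := by
          intro h; exact hp (by rw [← h]; simp)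
        have hk2 : String.ofList a ≠ "analysis_profile" := by
          intro h; exact hap (by rw [← h]; simp)
        simp only [pvStepA, pvStepB, hsw, hsw2, hIn, if_true,
          Bool.false_eq_true, if_false, hkey]
        unfold pvQuery
        rw [PySem.Dict.get?_insert_of_ne _ _ (fun h => hk1 h.symm),
            PySem.Dict.get?_insert_of_ne _ _ (fun h => hk2 h.symm)]
  · -- no '=' in arg: both steps are the identity
    have hIn : PySem.Str.isIn "=" arg = false := by
      rw [PySem.Str.isIn]
      apply Bool.eq_false_iff.mpr
      intro h
      rw [PySem.Chars.isIn_iff_infix] at h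
      exact hin (h.mem (by decide))
    have hsw : PySem.Str.startswith arg "profile=" = false := by
      rw [PySem.Str.startswith]
      apply Bool.eq_false_iff.mpr
      intro h
      rw [PySem.Chars.startswith, List.isPrefixOf_iff_prefix] at h
      exact hin (h.mem (by decide))
    have hsw2 : PySem.Str.startswith arg "analysis_profile=" = false := by
      rw [PySem.Str.startswith]
      apply Bool.eq_false_iff.mpr
      intro h
      rw [PySem.Chars.startswith, List.isPrefixOf_iff_prefix] at h
      exact hin (h.mem (by decide))
    simp only [pvStepA, pvStepB, hsw, hsw2, hIn, Bool.false_eq_true, if_false]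

theorem pv_fold (args : List String) : ∀ (d : PySem.Dict String String),
    args.foldl pvStepA (pvQuery d) = pvQuery (args.foldl pvStepB d) := by
  induction args with
  | nil => intro d; rfl
  | cons a t ih =>
    intro d
    simp only [List.foldl_cons]
    rw [pv_step d a]
    exact ih _

-- ===== VERDICT (by name: the statement is the Claim_ definition above) =====
theorem parse_script_options_py_spec : Claim_equal_parse_script_options_py := by
  intro args _
  unfold Spec_parse_script_options_py parse_script_options_py parse_script_options_py_alt
  have h0 : ((false : Bool), (none : Option String)) = pvQuery PySem.Dict.empty := by
    simp [pvQuery, PySem.Dict.get?_empty]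
  rw [h0, pv_fold]
  rfl
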